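-- pv_equiv track=rewrite | github.com/Rodeffs/Year2_Programming | Discrete_Math/04_lab/huffman.py | huffman2
-- ===== SOURCE A (Python) =====
-- def huffman2(stat, string_codes):  # коды Хаффмана для пар
--     pairs = list(stat.keys())
--     pair_group = list(string_codes.keys())
--     coded = {}
--
--     for i in range(0, len(pairs)):
--         cur_pair = pairs[i]
--         coded[cur_pair] = ""
--         for j in range(0, len(pair_group)):
--             string = pair_group[j]
--             split_string = []
--             for k in range(1, len(string), 2):  # делим строку на пары
--                 split_string.append(string[k-1]+string[k])
--             if cur_pair in split_string:
--                 coded[cur_pair] = string_codes[string] + coded[cur_pair]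
--
--     return coded
-- ===== SOURCE B (Python) =====
-- def huffman2(stat, string_codes):
--     # One pass over the coded strings (in reverse), appending each string's code
--     # to every pair it contains, instead of rescanning all strings per pair.
--     codes = {p: [] for p in stat}
--     for string in reversed(string_codes):
--         code = string_codes[string]
--         for p in dict.fromkeys(string[k - 1] + string[k] for k in range(1, len(string), 2)):
--             if p in codes:
--                 codes[p].append(code)
--     return {p: "".join(parts) for p, parts in codes.items()}
-- ===== Notes on version B (the rewrite author's own statement) =====
-- stated objective: faster
-- what changed: Instead of rescanning and re-splitting every coded string for each pair (P*G*L work), B makes one pass over the coded strings in reverse, splits each string into pairs once, and appends its code to a per-pair list, joining the lists at the end.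
import Mathlib
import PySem

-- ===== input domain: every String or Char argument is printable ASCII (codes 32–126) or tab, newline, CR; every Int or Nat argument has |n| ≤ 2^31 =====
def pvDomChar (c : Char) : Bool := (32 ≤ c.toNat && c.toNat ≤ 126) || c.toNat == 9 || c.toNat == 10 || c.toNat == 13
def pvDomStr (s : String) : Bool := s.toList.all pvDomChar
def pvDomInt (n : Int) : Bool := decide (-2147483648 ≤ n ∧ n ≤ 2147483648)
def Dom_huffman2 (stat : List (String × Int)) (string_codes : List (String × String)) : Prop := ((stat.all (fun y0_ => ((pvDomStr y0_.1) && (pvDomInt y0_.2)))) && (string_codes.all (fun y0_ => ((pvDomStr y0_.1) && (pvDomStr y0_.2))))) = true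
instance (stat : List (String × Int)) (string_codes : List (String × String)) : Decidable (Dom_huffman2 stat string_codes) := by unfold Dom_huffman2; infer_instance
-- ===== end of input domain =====

-- B re-implements huffman2 in one pass over the coded strings (splitting each string into
-- pairs once and appending its code to a per-pair list) instead of rescanning and
-- re-splitting every string for every pair; objective: faster.

-- Both Pythons compute the list 'string[k-1] + string[k] for k in range(1, len(string), 2)';
-- code values are tracked as char lists (Python str concatenation = list append; exact).
def pvSplitPairs (s : String) : List String :=
  (PySem.List.pyRange 1 (PySem.Str.len s) 2).foldl
    (fun acc k =>
      acc ++ [String.ofList [PySem.List.pyGetD s.toList (k - 1) 'A', PySem.List.pyGetD s.toList k 'A']]) []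

-- ===== PORT A =====
def huffman2 (stat : List (String × Int)) (string_codes : List (String × String)) : List (String × String) :=
  let statD := PySem.Dict.ofList stat
  let scD := PySem.Dict.ofList string_codes
  let pairs := statD.keys
  let pair_group := scD.keys
  let coded : PySem.Dict String (List Char) :=
    (PySem.List.pyRange 0 (pairs.length : Int) 1).foldl (fun coded i =>
      let cur_pair := PySem.List.pyGetD pairs i ""
      let coded := coded.insert cur_pair []
      (PySem.List.pyRange 0 (pair_group.length : Int) 1).foldl (fun coded j =>
        let string := PySem.List.pyGetD pair_group j ""
        let split_string := pvSplitPairs string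
        if cur_pair ∈ split_string then
          coded.insert cur_pair ((scD.getD string "").toList ++ coded.getD cur_pair [])
        else coded) coded) PySem.Dict.empty
  coded.items.map (fun q => (q.1, String.ofList q.2))

-- ===== PORT B =====
def huffman2_alt (stat : List (String × Int)) (string_codes : List (String × String)) : List (String × String) :=
  let scD := PySem.Dict.ofList string_codes
  -- codes = {p: [] for p in stat}
  let codes0 : PySem.Dict String (List String) :=
    (PySem.Dict.ofList stat).keys.foldl (fun d p => d.insert p []) PySem.Dict.empty
  -- for string in reversed(string_codes): for p in dict.fromkeys(pairs of string): append
  let codes : PySem.Dict String (List String) :=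
    scD.keys.reverse.foldl (fun d string =>
      let code := scD.getD string ""
      (PySem.List.dedup (pvSplitPairs string)).foldl
        (fun d p => if d.contains p then d.modify p [] (fun l => l ++ [code]) else d) d) codes0
  -- {p: "".join(parts) for p, parts in codes.items()}
  codes.items.map (fun q => (q.1, PySem.Str.join "" q.2))

-- ===== PRECONDITION & SPEC =====
def Spec_huffman2 (stat : List (String × Int)) (string_codes : List (String × String)) (out : List (String × String)) : Prop := out = huffman2_alt stat string_codes
instance (stat : List (String × Int)) (string_codes : List (String × String)) (out : List (String × String)) : Decidable (Spec_huffman2 stat string_codes out) := by unfold Spec_huffman2; infer_instance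

-- ===== CLAIM (what is proved, stated in full; the proofs are below) =====
def Claim_equal_huffman2 : Prop := ∀ (stat : List (String × Int)) (string_codes : List (String × String)), Dom_huffman2 stat string_codes → Spec_huffman2 stat string_codes (huffman2 stat string_codes)

-- ===== LEMMAS AND PROOFS =====

-- A's value for one pair: fold over the coded strings, prepending matching codes.
def pvValA (scD : PySem.Dict String String) (p : String) : List Char :=
  scD.keys.foldl (fun acc s => if p ∈ pvSplitPairs s then (scD.getD s "").toList ++ acc else acc) []

-- B's value for one pair: the codes of matching strings, in reverse order.
def pvValB (scD : PySem.Dict String String) (p : String) : List String :=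
  (scD.keys.reverse.filter (fun s => decide (p ∈ pvSplitPairs s))).map (fun s => scD.getD s "")

theorem pv_join_nil (ls : List (List Char)) : PySem.Chars.join [] ls = ls.flatten := by
  show List.intercalate [] ls = ls.flatten
  induction ls with
  | nil => rfl
  | cons x t ih => cases t <;> simp_all [List.intercalate, List.intersperse]


-- A's inner loop (list form) only rewrites the entry at cur_pair.
theorem pvA_inner (scD : PySem.Dict String String) (p : String)
    (l : List String) (d : PySem.Dict String (List Char)) (v : List Char) :
    l.foldl (fun coded s =>
        if p ∈ pvSplitPairs s then
          coded.insert p ((scD.getD s "").toList ++ coded.getD p [])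
        else coded) (d.insert p v)
      = d.insert p (l.foldl (fun acc s =>
          if p ∈ pvSplitPairs s then (scD.getD s "").toList ++ acc else acc) v) := by
  induction l generalizing v with
  | nil => rfl
  | cons s t ih =>
      by_cases h : p ∈ pvSplitPairs s
      · simp only [List.foldl_cons, if_pos h, PySem.Dict.getD_insert_self,
          PySem.Dict.insert_insert_self, ih]
      · simp only [List.foldl_cons, if_neg h, ih]

-- A's outer-loop body, named (the inner loop still in Python's range form).
def pvStepA (scD : PySem.Dict String String) (coded : PySem.Dict String (List Char))
    (cur_pair : String) : PySem.Dict String (List Char) :=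
  (PySem.List.pyRange 0 (scD.keys.length : Int) 1).foldl (fun coded j =>
    let string := PySem.List.pyGetD scD.keys j ""
    if cur_pair ∈ pvSplitPairs string then
      coded.insert cur_pair ((scD.getD string "").toList ++ coded.getD cur_pair [])
    else coded) (coded.insert cur_pair [])

theorem pvStepA_eq (scD : PySem.Dict String String) :
    pvStepA scD = fun coded p =>
      scD.keys.foldl (fun coded s =>
        if p ∈ pvSplitPairs s then
          coded.insert p ((scD.getD s "").toList ++ coded.getD p [])
        else coded) (coded.insert p []) := by
  funext coded p
  unfold pvStepA
  exact PySem.List.foldl_pyRange_zero_pyGetD' scD.keys ""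
      (fun coded s =>
        if p ∈ pvSplitPairs s then
          coded.insert p ((scD.getD s "").toList ++ coded.getD p [])
        else coded) (coded.insert p [])

-- A's outer loop appends one fresh item per pair.
theorem pvA_outer (scD : PySem.Dict String String)
    (ps : List String) (d : PySem.Dict String (List Char))
    (hnd : ps.Nodup) (hfresh : ∀ p ∈ ps, d.contains p = false) :
    (ps.foldl (fun coded p =>
        scD.keys.foldl (fun coded s =>
          if p ∈ pvSplitPairs s then
            coded.insert p ((scD.getD s "").toList ++ coded.getD p [])
          else coded) (coded.insert p [])) d).items
      = d.items ++ ps.map (fun p => (p, pvValA scD p)) := by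
  induction ps generalizing d with
  | nil => simp
  | cons p t ih =>
      simp only [List.foldl_cons, List.map_cons]
      rw [pvA_inner]
      have hc : d.contains p = false := hfresh p (by simp)
      rw [ih _ (List.nodup_cons.mp hnd).2
          (fun q hq => by
            rw [PySem.Dict.contains_insert]
            have hqp : q ≠ p := fun e => (List.nodup_cons.mp hnd).1 (e ▸ hq)
            simp [hqp, hfresh q (List.mem_cons_of_mem _ hq)]),
        PySem.Dict.items_insert_of_not_contains _ _ hc]
      simp [pvValA]

-- A's result, characterised.
theorem pvA_char (stat : List (String × Int)) (string_codes : List (String × String)) :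
    huffman2 stat string_codes
      = (PySem.Dict.ofList stat).keys.map
          (fun p => (p, String.ofList (pvValA (PySem.Dict.ofList string_codes) p))) := by
  unfold huffman2
  refine Eq.trans
    (congrArg (fun d : PySem.Dict String (List Char) => d.items.map (fun q => (q.1, String.ofList q.2)))
      (PySem.List.foldl_pyRange_zero_pyGetD' (PySem.Dict.ofList stat).keys ""
        (pvStepA (PySem.Dict.ofList string_codes)) PySem.Dict.empty)) ?_
  rw [pvStepA_eq,
    pvA_outer _ _ _ (PySem.Dict.nodup_keys_ofList stat) (fun p _ => rfl)]
  simp [Function.comp_def, PySem.Dict.empty]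

-- B's inner loop: keys are unchanged and the entry at p gains one code iff p occurs.
theorem pvB_inner_keys (code : String) (l : List String) (d : PySem.Dict String (List String)) :
    (l.foldl (fun d q => if d.contains q then d.modify q [] (fun w => w ++ [code]) else d) d).keys
      = d.keys := by
  induction l generalizing d with
  | nil => rfl
  | cons q t ih =>
      simp only [List.foldl_cons]
      by_cases h : d.contains q = true
      · rw [if_pos h, ih]
        rw [PySem.Dict.keys_modify, PySem.Dict.keys_insert_of_contains _ _ h]
      · rw [if_neg h, ih]

theorem pvB_inner_getD (code : String) (p : String) (l : List String)
    (d : PySem.Dict String (List String)) (hnd : l.Nodup) :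
    (l.foldl (fun d q => if d.contains q then d.modify q [] (fun w => w ++ [code]) else d) d).getD p []
      = if p ∈ l ∧ d.contains p = true then d.getD p [] ++ [code] else d.getD p [] := by
  induction l generalizing d with
  | nil => simp
  | cons q t ih =>
      simp only [List.foldl_cons]
      by_cases hq : q = p
      · subst hq
        have hqt : q ∉ t := (List.nodup_cons.mp hnd).1
        by_cases h : d.contains q = true
        · rw [if_pos h, ih _ (List.nodup_cons.mp hnd).2]
          simp [hqt, h, PySem.Dict.getD_modify_self]
        · rw [if_neg h, ih _ (List.nodup_cons.mp hnd).2]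
          simp [hqt, h]
      · by_cases h : d.contains q = true
        · rw [if_pos h, ih _ (List.nodup_cons.mp hnd).2]
          have h1 : (d.modify q [] (fun w => w ++ [code])).getD p [] = d.getD p [] :=
            PySem.Dict.getD_modify_of_ne _ _ _ (fun hc => hq hc.symm)
          have h2 : (d.modify q [] (fun w => w ++ [code])).contains p = d.contains p := by
            rw [PySem.Dict.contains_modify]
            simp [Ne.symm hq]
          rw [h1, h2]
          simp [Ne.symm hq]
        · rw [if_neg h, ih _ (List.nodup_cons.mp hnd).2]
          simp [Ne.symm hq]

-- B's outer-loop body, named.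
def pvStepB (scD : PySem.Dict String String) (d : PySem.Dict String (List String))
    (string : String) : PySem.Dict String (List String) :=
  (PySem.List.dedup (pvSplitPairs string)).foldl
    (fun d p => if d.contains p then d.modify p [] (fun w => w ++ [scD.getD string ""]) else d) d

theorem pvB_outer_keys (scD : PySem.Dict String String) (L : List String)
    (d : PySem.Dict String (List String)) :
    (L.foldl (pvStepB scD) d).keys = d.keys := by
  induction L generalizing d with
  | nil => rfl
  | cons s t ih =>
      simp only [List.foldl_cons]
      rw [ih]
      exact pvB_inner_keys _ _ _

theorem pvB_outer_getD (scD : PySem.Dict String String) (p : String) (L : List String)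
    (d : PySem.Dict String (List String)) (hp : d.contains p = true) :
    (L.foldl (pvStepB scD) d).getD p []
      = d.getD p [] ++ (L.filter (fun s => decide (p ∈ pvSplitPairs s))).map (fun s => scD.getD s "") := by
  induction L generalizing d with
  | nil => simp
  | cons s t ih =>
      simp only [List.foldl_cons, List.filter_cons]
      have hp' : (pvStepB scD d s).contains p = true := by
        rw [PySem.Dict.contains_iff_mem_keys] at hp ⊢
        rw [show (pvStepB scD d s).keys = d.keys from pvB_inner_keys _ _ _]
        exact hp
      rw [ih _ hp']
      have hgetD := pvB_inner_getD (scD.getD s "") p (PySem.List.dedup (pvSplitPairs s)) d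
        (PySem.List.nodup_dedup _)
      rw [show (pvStepB scD d s).getD p [] = _ from hgetD]
      by_cases h : p ∈ pvSplitPairs s
      · have hm : p ∈ PySem.List.dedup (pvSplitPairs s) := (PySem.List.mem_dedup _ _).mpr h
        simp [hp, h]
      · have hm : p ∉ PySem.List.dedup (pvSplitPairs s) := fun hc => h ((PySem.List.mem_dedup _ _).mp hc)
        simp [h]

-- B's result, characterised.
theorem pvB_char (stat : List (String × Int)) (string_codes : List (String × String)) :
    huffman2_alt stat string_codes
      = (PySem.Dict.ofList stat).keys.map
          (fun p => (p, PySem.Str.join "" (pvValB (PySem.Dict.ofList string_codes) p))) := by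
  unfold huffman2_alt
  show ((PySem.Dict.ofList string_codes).keys.reverse.foldl (pvStepB (PySem.Dict.ofList string_codes))
      ((PySem.Dict.ofList stat).keys.foldl (fun d p => d.insert p ([] : List String))
        PySem.Dict.empty)).items.map (fun q => (q.1, PySem.Str.join "" q.2)) = _
  have hnd : (PySem.Dict.ofList stat).keys.Nodup := PySem.Dict.nodup_keys_ofList stat
  set scD := PySem.Dict.ofList string_codes with hscD
  set pairs := (PySem.Dict.ofList stat).keys with hpairs
  set codes0 : PySem.Dict String (List String) :=
    pairs.foldl (fun d p => d.insert p ([] : List String)) PySem.Dict.empty with hcodes0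
  set final := scD.keys.reverse.foldl (pvStepB scD) codes0 with hfinal
  have h0 : codes0.items = pairs.map (fun p => (p, ([] : List String))) := by
    rw [hcodes0]
    have := PySem.Dict.items_foldl_insert_fresh pairs (fun p => p) (fun _ => ([] : List String))
      PySem.Dict.empty (fun a _ => rfl) (by simpa using hnd)
    simpa [PySem.Dict.empty] using this
  have hkeys0 : codes0.keys = pairs := by
    simp only [PySem.Dict.keys, h0, List.map_map]
    simp [Function.comp_def]
  have hfinalkeys : final.keys = pairs := by
    rw [hfinal, pvB_outer_keys, hkeys0]
  have hfinal_items : final.items = pairs.map (fun p => (p, pvValB scD p)) := by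
    rw [PySem.Dict.items_eq_map_keys final (by rw [hfinalkeys]; exact hnd) ([] : List String),
      hfinalkeys]
    refine List.map_congr_left (fun p hp => ?_)
    have hc0 : codes0.contains p = true := by
      rw [PySem.Dict.contains_iff_mem_keys, hkeys0]; exact hp
    have hget0 : codes0.getD p [] = [] :=
      PySem.Dict.getD_of_mem_items codes0
        (by rw [h0]; exact List.mem_map_of_mem (f := fun p => (p, ([] : List String))) hp)
        (by rw [hkeys0]; exact hnd) []
    rw [hfinal, pvB_outer_getD scD p _ codes0 hc0, hget0]
    simp [pvValB]
  rw [hfinal_items]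
  simp

-- the prepend loop, in closed form
theorem pv_prepend (m : String → Prop) [DecidablePred m] (c : String → List Char)
    (L : List String) (acc : List Char) :
    L.foldl (fun acc s => if m s then c s ++ acc else acc) acc
      = ((L.filter (fun s => decide (m s))).reverse.map c).flatten ++ acc := by
  induction L generalizing acc with
  | nil => simp
  | cons s t ih =>
      simp only [List.foldl_cons, List.filter_cons]
      by_cases h : m s
      · rw [if_pos h, ih]; simp [h]
      · rw [if_neg h, ih]; simp [h]

theorem pv_join_empty (parts : List String) :
    PySem.Str.join "" parts = String.ofList ((parts.map String.toList).flatten) := by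
  have h := PySem.Str.toList_join "" parts
  have h2 : ("" : String).toList = [] := rfl
  rw [h2, pv_join_nil] at h
  exact (String.ofList_toList).symm.trans (congrArg String.ofList h)

-- per-pair value equality
theorem pv_val_eq (scD : PySem.Dict String String) (p : String) :
    String.ofList (pvValA scD p) = PySem.Str.join "" (pvValB scD p) := by
  rw [pv_join_empty]
  unfold pvValA pvValB
  rw [pv_prepend (fun s => p ∈ pvSplitPairs s) (fun s => (scD.getD s "").toList)]
  simp [List.filter_reverse, List.map_map, Function.comp_def]

-- ===== VERDICT (by name: the statement is the Claim_ definition above) =====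
theorem huffman2_spec : Claim_equal_huffman2 := by
  intro stat string_codes _
  show huffman2 stat string_codes = huffman2_alt stat string_codes
  rw [pvA_char, pvB_char]
  exact List.map_congr_left (fun p _ => by rw [pv_val_eq])
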